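-- pv_equiv track=rewrite | github.com/Leapense/problems | 22007번: Zeros/Zeros.py | get_max_k
-- ===== SOURCE A (Python) =====
-- def get_max_k(p, a, b):
--     max_k = 0
--     k = 1
--     while True:
--         power = p ** k
--         if power > b:
--             break
--         if b // power - (a - 1) // power >= 1:
--             max_k = k
--         k += 1
--     return max_k
-- ===== SOURCE B (Python) =====
-- def get_max_k(p, a, b):
--     # Binary search over the monotone predicate "a multiple of p**k lies in [a, b]"
--     # instead of A's linear scan over k.
--     def ok(k):
--         power = p ** k
--         return b // power - (a - 1) // power >= 1
--
--     if p > b: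
--         return 0
--     # exponential doubling: find hi with p**hi <= b < p**(2*hi)
--     hi = 1
--     while p ** (2 * hi) <= b:
--         hi *= 2
--     # binary search the largest L with p**L <= b in [hi, 2*hi)
--     lo, up = hi, 2 * hi
--     while lo + 1 < up:
--         mid = (lo + up) // 2
--         if p ** mid <= b:
--             lo = mid
--         else:
--             up = mid
--     L = lo
--     if not ok(1):
--         return 0
--     # binary search the largest k in [1, L] with ok(k)
--     lo2, hi2 = 1, L
--     while lo2 < hi2:
--         mid = (lo2 + hi2 + 1) // 2
--         if ok(mid):
--             lo2 = mid
--         else: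
--             hi2 = mid - 1
--     return lo2
-- ===== Notes on version B (the rewrite author's own statement) =====
-- stated objective: alternative
-- what changed: Replaces A's linear scan k=1,2,3,... with exponential doubling plus two binary searches over the monotone predicate 'some multiple of p**k lies in [a,b]' (same count expression b//p**k-(a-1)//p**k>=1), returning 0 when no k qualifies.
-- outside the precondition, e.g. on get_max_k(-2, 1, 10): A returns 2, B returns 0; on get_max_k(1, 2, 0): A returns 0, B returns 0
import Mathlib
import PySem

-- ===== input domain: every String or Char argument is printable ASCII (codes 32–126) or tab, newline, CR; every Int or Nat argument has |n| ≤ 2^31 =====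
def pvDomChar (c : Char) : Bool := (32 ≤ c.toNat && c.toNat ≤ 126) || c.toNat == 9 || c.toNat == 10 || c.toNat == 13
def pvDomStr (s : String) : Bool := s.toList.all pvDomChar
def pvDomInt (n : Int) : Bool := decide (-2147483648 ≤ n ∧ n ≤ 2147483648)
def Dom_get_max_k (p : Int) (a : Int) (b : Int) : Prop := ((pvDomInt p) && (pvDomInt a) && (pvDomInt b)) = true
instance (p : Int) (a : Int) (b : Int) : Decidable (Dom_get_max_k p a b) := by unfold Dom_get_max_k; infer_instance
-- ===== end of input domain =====

-- B replaces A's linear scan over k with exponential doubling plus two binary searches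
-- over the monotone predicate "a multiple of p^k lies in [a,b]" (objective: alternative).

-- ===== PORT A =====
-- A's `while True` loop as fuel recursion (the fuel only makes it total: inside Pre_
-- the break `power > b` fires at k ≤ 32, long before fuel 100 runs out).
-- The exponent k is a Nat (Python's k starts at 1 and only increments); `p ** k` is `p ^ k`.
def getMaxKGoA (p a b : Int) : Nat → Nat → Int → Int
  | 0, _, maxk => maxk
  | fuel+1, k, maxk =>
      let power := p ^ k
      if power > b then maxk
      else
        let maxk' := if PySem.Int.floordiv b power - PySem.Int.floordiv (a - 1) power ≥ 1
                     then (k : Int) else maxk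
        getMaxKGoA p a b fuel (k + 1) maxk'

def get_max_k (p : Int) (a : Int) (b : Int) : Int := getMaxKGoA p a b 100 1 0

-- ===== PORT B =====
-- Source B helper ok(k): "b // p**k - (a-1) // p**k >= 1"
def altOk (p a b : Int) (k : Nat) : Bool :=
  let power := p ^ k
  decide (PySem.Int.floordiv b power - PySem.Int.floordiv (a - 1) power ≥ 1)

-- Source B doubling loop: `while p ** (2*hi) <= b: hi *= 2` (fuel only for totality)
def altDouble (p b : Int) : Nat → Nat → Nat
  | 0, hi => hi
  | fuel+1, hi => if p ^ (2 * hi) ≤ b then altDouble p b fuel (2 * hi) else hi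

-- Source B first binary search: largest L with p**L <= b, in [lo, up)
def altSearchL (p b : Int) : Nat → Nat → Nat → Nat
  | 0, lo, _ => lo
  | fuel+1, lo, up =>
      if lo + 1 < up then
        let mid := (lo + up) / 2
        if p ^ mid ≤ b then altSearchL p b fuel mid up
        else altSearchL p b fuel lo mid
      else lo

-- Source B second binary search: largest k in [lo, hi] with ok(k)
def altSearchK (p a b : Int) : Nat → Nat → Nat → Nat
  | 0, lo, _ => lo
  | fuel+1, lo, hi =>
      if lo < hi then
        let mid := (lo + hi + 1) / 2
        if altOk p a b mid then altSearchK p a b fuel mid hi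
        else altSearchK p a b fuel lo (mid - 1)
      else lo

def get_max_k_alt (p : Int) (a : Int) (b : Int) : Int :=
  if p > b then 0
  else
    let hi := altDouble p b 64 1
    let L := altSearchL p b 100 hi (2 * hi)
    if altOk p a b 1 = false then 0
    else (altSearchK p a b 100 1 L : Int)

-- ===== PRECONDITION & SPEC =====
-- Pre_ restricts to the task's natural domain p ≥ 2 (p is a prime in the source problem):
-- for p in {-1,0,1} A's loop diverges on most inputs (e.g. p=1, b=1) and returns only on
-- trivial ones, and for p ≤ -2 the break point and the floor divisions by negative powers
-- produce accidental values with no meaning for "largest k with a multiple of p^k in [a,b]".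
def Pre_get_max_k (p : Int) (a : Int) (b : Int) : Prop := 2 ≤ p
instance (p : Int) (a : Int) (b : Int) : Decidable (Pre_get_max_k p a b) := by
  unfold Pre_get_max_k; infer_instance

def pvWitness_get_max_k : Int × Int × Int := (2, 3, 4)

def Spec_get_max_k (p : Int) (a : Int) (b : Int) (out : Int) : Prop := out = get_max_k_alt p a b
instance (p : Int) (a : Int) (b : Int) (out : Int) : Decidable (Spec_get_max_k p a b out) := by
  unfold Spec_get_max_k; infer_instance

-- ===== CLAIM (what is proved, stated in full; the proofs are below) =====
def Claim_equal_get_max_k : Prop := ∀ (p : Int) (a : Int) (b : Int),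
  Dom_get_max_k p a b → Pre_get_max_k p a b → Spec_get_max_k p a b (get_max_k p a b)

-- ===== LEMMAS AND PROOFS =====

-- the monotone predicate both programs test, and the greatest qualifying k up to n
abbrev okQ (p a b : Int) (k : Nat) : Prop := 1 ≤ k ∧ p ^ k ≤ b ∧ altOk p a b k = true

def FF (p a b : Int) (n : Nat) : Nat := Nat.findGreatest (okQ p a b) n

lemma pow_mono_pv {p : Int} (h2 : 2 ≤ p) {k m : Nat} (h : k ≤ m) : p ^ k ≤ p ^ m :=
  pow_le_pow_right₀ (by omega) h

lemma big_pow {p b : Int} (h2 : 2 ≤ p) (hb : b ≤ 2 ^ 31) {k : Nat} (hk : 32 ≤ k) : b < p ^ k := by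
  have h1 : (2:Int) ^ 32 ≤ 2 ^ k := pow_le_pow_right₀ (by norm_num) hk
  have h2' : (2:Int) ^ k ≤ p ^ k := pow_le_pow_left₀ (by norm_num) h2 k
  have h3 : (2:Int) ^ 31 < 2 ^ 32 := by norm_num
  linarith

lemma k_small {p b : Int} (h2 : 2 ≤ p) (hb : b ≤ 2 ^ 31) {k : Nat} (hpk : p ^ k ≤ b) : k ≤ 31 := by
  by_contra h
  exact absurd hpk (not_le.mpr (big_pow h2 hb (by omega)))

-- "the count is ≥ 1" ↔ "some multiple of p^k lies in [a,b]"
lemma ok_iff {p a b : Int} (k : Nat) (hp : 0 < p ^ k) :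
    altOk p a b k = true ↔ ∃ t : Int, a ≤ t * p ^ k ∧ t * p ^ k ≤ b := by
  simp only [altOk, decide_eq_true_eq, ge_iff_le]
  constructor
  · intro h
    refine ⟨PySem.Int.floordiv b (p ^ k), ?_, ?_⟩
    · have h1 : PySem.Int.floordiv (a - 1) (p ^ k) < PySem.Int.floordiv b (p ^ k) := by omega
      have := (PySem.Int.floordiv_lt_iff_lt_mul hp).mp h1
      linarith
    · exact (PySem.Int.le_floordiv_iff_mul_le hp).mp le_rfl
  · rintro ⟨t, h1, h2⟩
    have ht1 : t ≤ PySem.Int.floordiv b (p ^ k) := (PySem.Int.le_floordiv_iff_mul_le hp).mpr h2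
    have ht2 : PySem.Int.floordiv (a - 1) (p ^ k) < t :=
      (PySem.Int.floordiv_lt_iff_lt_mul hp).mpr (by linarith)
    omega

lemma ok_succ {p a b : Int} (h2 : 2 ≤ p) (k : Nat)
    (h : altOk p a b (k + 1) = true) : altOk p a b k = true := by
  have hp : (0:Int) < p := by omega
  obtain ⟨t, h1, h2'⟩ := (ok_iff (k + 1) (pow_pos hp _)).mp h
  refine (ok_iff k (pow_pos hp _)).mpr ⟨t * p, ?_, ?_⟩
  · calc a ≤ t * p ^ (k + 1) := h1
      _ = t * p * p ^ k := by rw [pow_succ]; ring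
  · calc t * p * p ^ k = t * p ^ (k + 1) := by rw [pow_succ]; ring
      _ ≤ b := h2'

lemma ok_mono {p a b : Int} (h2 : 2 ≤ p) {k : Nat} :
    ∀ m, k ≤ m → altOk p a b m = true → altOk p a b k = true := by
  intro m
  induction m with
  | zero => intro hkm h; rw [Nat.le_zero.mp hkm]; exact h
  | succ m ih =>
      intro hkm h
      rcases Nat.lt_or_ge k (m + 1) with hlt | hge
      · exact ih (by omega) (ok_succ h2 m h)
      · rw [(by omega : k = m + 1)]; exact h

-- findGreatest is unchanged when everything above n fails
lemma fg_congr (P : Nat → Prop) [DecidablePred P] :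
    ∀ (m n : Nat), n ≤ m → (∀ j, n < j → j ≤ m → ¬ P j) →
      Nat.findGreatest P m = Nat.findGreatest P n := by
  intro m
  induction m with
  | zero => intro n h _; rw [Nat.le_zero.mp h]
  | succ m ih =>
      intro n hn hnot
      rcases Nat.lt_or_ge n (m + 1) with hlt | hge
      · have hnp : ¬ P (m + 1) := hnot _ (by omega) le_rfl
        rw [Nat.findGreatest_succ, if_neg hnp]
        exact ih n (by omega) (fun j h1 h2 => hnot j h1 (by omega))
      · rw [(by omega : n = m + 1)]

-- ===== characterisation of A =====
lemma goA_eq {p a b : Int} (h2 : 2 ≤ p) (hb : b ≤ 2 ^ 31) :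
    ∀ (fuel k : Nat), 1 ≤ k → 33 ≤ k + fuel → (k = 1 ∨ p ^ (k - 1) ≤ b) →
      getMaxKGoA p a b fuel k ((FF p a b (k - 1) : Nat) : Int) = ((FF p a b 40 : Nat) : Int) := by
  intro fuel
  induction fuel with
  | zero =>
      intro k h1 h33 hprev
      exfalso
      rcases hprev with rfl | hle
      · omega
      · exact absurd hle (not_le.mpr (big_pow h2 hb (by omega)))
  | succ fuel ih =>
      intro k h1 h33 hprev
      simp only [getMaxKGoA]
      by_cases hbr : p ^ k > b
      · rw [if_pos hbr]
        have hcongr := fg_congr (okQ p a b) 40 (k - 1)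
          (by
            rcases hprev with rfl | hle
            · omega
            · have := k_small h2 hb hle; omega)
          (fun j hj1 hj2 hQ =>
            absurd hQ.2.1 (not_le.mpr (lt_of_lt_of_le hbr (pow_mono_pv h2 (by omega : k ≤ j)))))
        unfold FF
        rw [hcongr]
      · rw [if_neg hbr]
        have hple : p ^ k ≤ b := not_lt.mp hbr
        obtain ⟨j, rfl⟩ : ∃ j, k = j + 1 := ⟨k - 1, by omega⟩
        have hstep : FF p a b (j + 1) =
            if okQ p a b (j + 1) then j + 1 else FF p a b j := Nat.findGreatest_succ j
        by_cases hc : PySem.Int.floordiv b (p ^ (j+1)) - PySem.Int.floordiv (a - 1) (p ^ (j+1)) ≥ 1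
        · have hok : altOk p a b (j + 1) = true := by
            simp only [altOk]; exact decide_eq_true hc
          have hQ : okQ p a b (j + 1) := ⟨by omega, hple, hok⟩
          rw [if_pos hc]
          have hm : ((j + 1 : Nat) : Int) = ((FF p a b ((j + 1 + 1) - 1) : Nat) : Int) := by
            rw [show (j + 1 + 1) - 1 = j + 1 from rfl, hstep, if_pos hQ]
          rw [hm]
          exact ih (j + 1 + 1) (by omega) (by omega) (Or.inr (by simpa using hple))
        · have hok : altOk p a b (j + 1) = false := by
            simp only [altOk]; exact decide_eq_false hc
          have hQ : ¬ okQ p a b (j + 1) := fun h => by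
            rw [h.2.2] at hok; exact Bool.noConfusion hok
          rw [if_neg hc]
          have hm : ((FF p a b ((j + 1) - 1) : Nat) : Int) = ((FF p a b ((j + 1 + 1) - 1) : Nat) : Int) := by
            rw [show (j + 1) - 1 = j from rfl, show (j + 1 + 1) - 1 = j + 1 from rfl, hstep,
              if_neg hQ]
          rw [hm]
          exact ih (j + 1 + 1) (by omega) (by omega) (Or.inr (by simpa using hple))

lemma A_eq_FF {p a b : Int} (h2 : 2 ≤ p) (hb : b ≤ 2 ^ 31) :
    get_max_k p a b = ((FF p a b 40 : Nat) : Int) := by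
  have h := goA_eq (p := p) (a := a) (b := b) h2 hb 100 1 (by omega) (by omega) (Or.inl rfl)
  have h0 : FF p a b 0 = 0 := rfl
  unfold get_max_k
  simpa [h0] using h

-- ===== characterisation of B =====
lemma altDouble_spec {p b : Int} (h2 : 2 ≤ p) (hb : b ≤ 2 ^ 31) :
    ∀ (fuel hi : Nat), 1 ≤ hi → p ^ hi ≤ b → 32 ≤ hi * 2 ^ fuel →
      1 ≤ altDouble p b fuel hi ∧ p ^ altDouble p b fuel hi ≤ b ∧
        b < p ^ (2 * altDouble p b fuel hi) := by
  intro fuel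
  induction fuel with
  | zero =>
      intro hi h1 hle hbig
      have he : hi * 2 ^ 0 = hi := by ring
      exact absurd hle (not_le.mpr (big_pow h2 hb (by omega)))
  | succ fuel ih =>
      intro hi h1 hle hbig
      simp only [altDouble]
      by_cases hc : p ^ (2 * hi) ≤ b
      · rw [if_pos hc]
        refine ih (2 * hi) (by omega) hc ?_
        have he : 2 * hi * 2 ^ fuel = hi * 2 ^ (fuel + 1) := by ring
        omega
      · rw [if_neg hc]
        exact ⟨h1, hle, not_le.mp hc⟩

lemma altSearchL_spec {p b : Int} (h2 : 2 ≤ p) :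
    ∀ (fuel lo up : Nat), lo < up → up - lo ≤ fuel + 1 → p ^ lo ≤ b → b < p ^ up →
      p ^ altSearchL p b fuel lo up ≤ b ∧ b < p ^ (altSearchL p b fuel lo up + 1) := by
  intro fuel
  induction fuel with
  | zero =>
      intro lo up hlt hgap hlo hup
      have : up = lo + 1 := by omega
      subst this
      simp only [altSearchL]
      exact ⟨hlo, hup⟩
  | succ fuel ih =>
      intro lo up hlt hgap hlo hup
      simp only [altSearchL]
      by_cases hc : lo + 1 < up
      · rw [if_pos hc]
        have hmid1 : lo < (lo + up) / 2 := by omega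
        have hmid2 : (lo + up) / 2 < up := by omega
        by_cases hm : p ^ ((lo + up) / 2) ≤ b
        · rw [if_pos hm]
          exact ih ((lo + up) / 2) up hmid2 (by omega) hm hup
        · rw [if_neg hm]
          exact ih lo ((lo + up) / 2) hmid1 (by omega) hlo (not_le.mp hm)
      · rw [if_neg hc]
        have : up = lo + 1 := by omega
        subst this
        exact ⟨hlo, hup⟩

lemma altSearchK_spec {p a b : Int} (h2 : 2 ≤ p) :
    ∀ (fuel lo hi : Nat), lo ≤ hi → hi - lo ≤ fuel → altOk p a b lo = true →
      lo ≤ altSearchK p a b fuel lo hi ∧ altSearchK p a b fuel lo hi ≤ hi ∧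
        altOk p a b (altSearchK p a b fuel lo hi) = true ∧
        (∀ j, altSearchK p a b fuel lo hi < j → j ≤ hi → ¬ altOk p a b j = true) := by
  intro fuel
  induction fuel with
  | zero =>
      intro lo hi hle hgap hok
      have : hi = lo := by omega
      subst this
      simp only [altSearchK]
      exact ⟨le_rfl, le_rfl, hok, fun j h1 h2 => absurd (lt_of_lt_of_le h1 h2) (lt_irrefl _)⟩
  | succ fuel ih =>
      intro lo hi hle hgap hok
      simp only [altSearchK]
      by_cases hc : lo < hi
      · rw [if_pos hc]
        have hmid1 : lo < (lo + hi + 1) / 2 := by omega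
        have hmid2 : (lo + hi + 1) / 2 ≤ hi := by omega
        by_cases hm : altOk p a b ((lo + hi + 1) / 2) = true
        · rw [if_pos hm]
          obtain ⟨r1, r2, r3, r4⟩ := ih ((lo + hi + 1) / 2) hi hmid2 (by omega) hm
          exact ⟨by omega, r2, r3, r4⟩
        · rw [if_neg hm]
          obtain ⟨r1, r2, r3, r4⟩ := ih lo ((lo + hi + 1) / 2 - 1) (by omega) (by omega) hok
          refine ⟨r1, by omega, r3, fun j h1 hj2 hj => ?_⟩
          rcases Nat.lt_or_ge ((lo + hi + 1) / 2 - 1) j with hbig | hsmall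
          · exact hm (ok_mono h2 j (by omega) hj)
          · exact r4 j h1 hsmall hj
      · rw [if_neg hc]
        exact ⟨le_rfl, by omega, hok, fun j h1 h2 => by omega⟩

lemma B_eq_FF {p a b : Int} (h2 : 2 ≤ p) (hb : b ≤ 2 ^ 31) :
    get_max_k_alt p a b = ((FF p a b 40 : Nat) : Int) := by
  unfold get_max_k_alt
  by_cases hpb : p > b
  · rw [if_pos hpb]
    have hcongr := fg_congr (okQ p a b) 40 0 (by omega)
      (fun j hj1 hj2 hQ => by
        have h1j : p ≤ p ^ j := by
          have := pow_mono_pv h2 hQ.1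
          rwa [pow_one] at this
        have := hQ.2.1
        omega)
    unfold FF
    rw [hcongr]
    rfl
  · rw [if_neg hpb]
    have hple : p ≤ b := not_lt.mp hpb
    obtain ⟨hd1, hd2, hd3⟩ := altDouble_spec h2 hb 64 1 le_rfl (by rwa [pow_one]) (by norm_num)
    set hi := altDouble p b 64 1 with hhi
    have hgap : 2 * hi - hi ≤ 100 + 1 := by
      have := k_small h2 hb hd2; omega
    obtain ⟨hL1, hL2⟩ := altSearchL_spec h2 100 hi (2 * hi) (by omega) hgap hd2 hd3
    set L := altSearchL p b 100 hi (2 * hi) with hLdef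
    by_cases hok1 : altOk p a b 1 = false
    · rw [if_pos hok1]
      have hcongr := fg_congr (okQ p a b) 40 0 (by omega)
        (fun j hj1 hj2 hQ => by
          have := ok_mono h2 j hQ.1 hQ.2.2
          rw [hok1] at this
          exact Bool.noConfusion this)
      unfold FF
      rw [hcongr]
      rfl
    · rw [if_neg hok1]
      have hok1' : altOk p a b 1 = true := by
        cases h : altOk p a b 1 with
        | false => exact absurd h hok1
        | true => rfl
      have hL31 : L ≤ 31 := k_small h2 hb hL1
      have hL1' : 1 ≤ L := by
        by_contra h
        have hL0 : L = 0 := by omega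
        rw [hL0, zero_add, pow_one] at hL2
        omega
      obtain ⟨r1, r2, r3, r4⟩ := altSearchK_spec h2 100 1 L hL1' (by omega) hok1'
      set r := altSearchK p a b 100 1 L with hrdef
      have hFr : FF p a b 40 = r := by
        unfold FF
        rw [Nat.findGreatest_eq_iff]
        refine ⟨by omega, fun _ => ⟨r1, le_trans (pow_mono_pv h2 r2) hL1, r3⟩, ?_⟩
        intro k hk1 hk2 hQ
        rcases Nat.lt_or_ge L k with hbig | hsmall
        · exact absurd hQ.2.1 (not_le.mpr (lt_of_lt_of_le hL2 (pow_mono_pv h2 (by omega : L + 1 ≤ k))))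
        · exact r4 k hk1 hsmall hQ.2.2
      rw [hFr]

-- ===== VERDICT (by name: the statement is the Claim_ definition above) =====
theorem get_max_k_spec : Claim_equal_get_max_k := by
  intro p a b hdom hpre
  unfold Spec_get_max_k
  have h2 : 2 ≤ p := hpre
  have hb : b ≤ 2 ^ 31 := by
    unfold Dom_get_max_k at hdom
    simp only [pvDomInt, Bool.and_eq_true, decide_eq_true_eq] at hdom
    have h := hdom.2.2
    have : (2:Int) ^ 31 = 2147483648 := by norm_num
    omega
  rw [A_eq_FF h2 hb, B_eq_FF h2 hb]
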